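-- pv_equiv track=rewrite | github.com/ges0531/TIL | Algorithm/swea/수의 새로운 연산/수의 새로운 연산.py | result
-- ===== SOURCE A (Python) =====
-- def result(a, b):
--     x = 0
--     for i in range(1, a+1):
--         x += i
--         q = a
--     for j in range(a, b+a-1):
--         x += j
--
--     return x
-- ===== SOURCE B (Python) =====
-- def result(a, b):
--     # closed-form arithmetic series: sum 1..a plus sum a..(a+b-2)
--     first = a * (a + 1) // 2 if a >= 1 else 0
--     n = b - 1
--     second = n * (2 * a + n - 1) // 2 if n >= 1 else 0
--     return first + second
-- ===== Notes on version B (the rewrite author's own statement) =====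
-- stated objective: faster
-- what changed: Replaces the two summation loops (length a and b-1) with closed-form arithmetic-series formulas a(a+1)/2 and (b-1)(2a+b-2)/2, guarded for empty ranges.
import Mathlib
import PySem

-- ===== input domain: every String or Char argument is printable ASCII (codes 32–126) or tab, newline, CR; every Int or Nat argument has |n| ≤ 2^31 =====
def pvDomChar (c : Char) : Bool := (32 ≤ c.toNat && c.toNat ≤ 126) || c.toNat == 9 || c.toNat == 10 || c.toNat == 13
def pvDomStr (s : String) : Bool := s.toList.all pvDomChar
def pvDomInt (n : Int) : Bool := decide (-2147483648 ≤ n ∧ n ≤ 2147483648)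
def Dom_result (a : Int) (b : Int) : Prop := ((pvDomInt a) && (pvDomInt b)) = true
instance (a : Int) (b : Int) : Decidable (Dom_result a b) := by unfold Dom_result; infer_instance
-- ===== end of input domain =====

-- B replaces A's two summation loops with closed-form arithmetic-series formulas (O(1) vs O(a+b)).

-- ===== PORT A =====
-- 'q = a' in A's first loop is dead state (never read) and is not carried.
def result (a : Int) (b : Int) : Int :=
  let x := (PySem.List.pyRange 1 (a + 1) 1).foldl (fun x i => x + i) 0
  (PySem.List.pyRange a (b + a - 1) 1).foldl (fun x j => x + j) x

-- ===== PORT B =====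
def result_alt (a : Int) (b : Int) : Int :=
  let first := if a ≥ 1 then PySem.Int.floordiv (a * (a + 1)) 2 else 0
  let n := b - 1
  let second := if n ≥ 1 then PySem.Int.floordiv (n * (2 * a + n - 1)) 2 else 0
  first + second

-- ===== PRECONDITION & SPEC =====
def Spec_result (a : Int) (b : Int) (out : Int) : Prop := out = result_alt a b
instance (a : Int) (b : Int) (out : Int) : Decidable (Spec_result a b out) := by unfold Spec_result; infer_instance

-- ===== CLAIM (what is proved, stated in full; the proofs are below) =====
def Claim_equal_result : Prop := ∀ (a : Int) (b : Int), Dom_result a b → Spec_result a b (result a b)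

-- ===== LEMMAS AND PROOFS =====

-- doubled arithmetic-series sum of a step-1 range, fold form
theorem two_mul_foldl_pyRange (n : Nat) (lo x : Int) :
    2 * (PySem.List.pyRange lo (lo + (n : Int)) 1).foldl (fun s i => s + i) x
      = 2 * x + (n : Int) * (2 * lo + (n : Int) - 1) := by
  induction n generalizing x with
  | zero => simp [PySem.List.pyRange_one_eq_nil (le_refl lo)]
  | succ k ih =>
      have hsplit : lo + ((k + 1 : Nat) : Int) = (lo + (k : Int)) + 1 := by push_cast; ring
      rw [hsplit, PySem.List.pyRange_one_succ_right (by omega), List.foldl_append]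
      simp only [List.foldl_cons, List.foldl_nil]
      have := ih x
      push_cast at this ⊢
      linarith [this]

-- ===== VERDICT (by name: the statement is the Claim_ definition above) =====
theorem result_spec : Claim_equal_result := by
  intro a b _
  unfold Spec_result result result_alt
  simp only []
  -- first loop
  have h1 : 2 * (PySem.List.pyRange 1 (a + 1) 1).foldl (fun s i => s + i) 0
      = 2 * (if a ≥ 1 then PySem.Int.floordiv (a * (a + 1)) 2 else 0) := by
    by_cases ha : a ≥ 1
    · rw [if_pos ha, PySem.Int.floordiv_eq_ediv_of_pos (by norm_num)]
      obtain ⟨r, hr⟩ := Int.even_mul_succ_self a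
      have hd : (2 : Int) ∣ a * (a + 1) := ⟨r, by rw [hr]; ring⟩
      rw [Int.mul_ediv_cancel' hd]
      rw [show a + 1 = 1 + ((a.toNat : Int)) from by omega]
      rw [two_mul_foldl_pyRange a.toNat 1 0]
      have hcast : ((a.toNat : Int)) = a := by omega
      rw [hcast]
      ring
    · rw [if_neg ha, PySem.List.pyRange_one_eq_nil (by omega)]
      simp
  -- second loop on top of an arbitrary start value
  have h2 : ∀ x : Int, 2 * (PySem.List.pyRange a (b + a - 1) 1).foldl (fun s j => s + j) x
      = 2 * x + 2 * (if b - 1 ≥ 1 then PySem.Int.floordiv ((b - 1) * (2 * a + (b - 1) - 1)) 2 else 0) := by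
    intro x
    by_cases hb : b - 1 ≥ 1
    · rw [if_pos hb, PySem.Int.floordiv_eq_ediv_of_pos (by norm_num)]
      have h2d : (2 : Int) ∣ (b - 1) * (2 * a + (b - 1) - 1) := by
        rcases Int.even_or_odd (b - 1) with ⟨k, hk⟩ | ⟨k, hk⟩
        · exact ⟨k * (2 * a + (b - 1) - 1), by rw [hk]; ring⟩
        · exact ⟨(b - 1) * (a + k), by rw [hk]; ring⟩
      rw [Int.mul_ediv_cancel' h2d]
      rw [show b + a - 1 = a + (((b - 1).toNat : Int)) from by omega]
      rw [two_mul_foldl_pyRange (b - 1).toNat a x]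
      have hcast : (((b - 1).toNat : Int)) = b - 1 := by omega
      rw [hcast]
    · rw [if_neg hb, PySem.List.pyRange_one_eq_nil (by omega)]
      simp
  have := h2 ((PySem.List.pyRange 1 (a + 1) 1).foldl (fun s i => s + i) 0)
  omega
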